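-- pv_equiv track=rewrite | github.com/ChaissonLab/extend_ctyper_database | scripts/fixstrd.py | parse_segments_field2
-- ===== SOURCE A (Python) =====
-- from typing import Dict, List, Tuple, Optional
--
-- def parse_segments_field2(s: str) -> List[Tuple[str, str]]:
--     """
--     field2: concatenation of (<|>)NAME blocks, e.g. "<A>B<C"
--     """
--     out: List[Tuple[str, str]] = []
--     i = 0
--     n = len(s)
--     while i < n:
--         d = s[i]
--         if d not in "<>":
--             raise RuntimeError(f"Field2 parse error at pos {i}: {s}")
--         j = i + 1
--         while j < n and s[j] not in "<>":
--             j += 1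
--         name = s[i + 1:j]
--         if not name:
--             raise RuntimeError(f"Empty segment name in field2: {s}")
--         out.append((d, name))
--         i = j
--     return out
-- ===== SOURCE B (Python) =====
-- def parse_segments_field2(s):
--     # Single reverse pass with an accumulator, building the output back-to-front.
--     out = []
--     name = []
--     for c in reversed(s):
--         if c in "<>":
--             if not name:
--                 raise RuntimeError(f"Empty segment name in field2: {s}")
--             out.append((c, "".join(reversed(name))))
--             name = []
--         else:
--             name.append(c)
--     if name:
--         raise RuntimeError(f"Field2 parse error at pos 0: {s}")
--     return out[::-1]
-- ===== Notes on version B (the rewrite author's own statement) =====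
-- stated objective: alternative
-- what changed: Replaces A's forward index scan with an inner name-collecting loop by a single pass over the reversed string with a name accumulator, emitting segments back-to-front and reversing the output once at the end.
import Mathlib
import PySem

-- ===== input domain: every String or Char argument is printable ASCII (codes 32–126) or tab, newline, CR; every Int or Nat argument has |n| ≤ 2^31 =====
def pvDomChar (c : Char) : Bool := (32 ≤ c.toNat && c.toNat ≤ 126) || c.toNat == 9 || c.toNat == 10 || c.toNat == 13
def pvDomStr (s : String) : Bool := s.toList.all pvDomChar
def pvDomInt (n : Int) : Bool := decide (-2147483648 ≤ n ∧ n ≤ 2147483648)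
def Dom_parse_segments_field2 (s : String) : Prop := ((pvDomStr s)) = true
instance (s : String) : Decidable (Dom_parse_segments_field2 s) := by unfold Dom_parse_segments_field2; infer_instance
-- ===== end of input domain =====

-- B replaces A's forward index scan with inner name loop by one reverse pass with an
-- accumulator building the output back-to-front (objective: alternative decomposition).

-- ===== PORT A =====
-- `c in "<>"` (shared by both Pythons)
def isDelim (c : Char) : Bool := c == '<' || c == '>'

-- inner while loop of A: the name chars `s[i+1:j]`
def takeName : List Char → List Char
  | [] => []
  | c :: cs => if isDelim c then [] else c :: takeName cs

-- the rest of the string from position j on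
def dropName : List Char → List Char
  | [] => []
  | c :: cs => if isDelim c then c :: cs else dropName cs

theorem dropName_length_le (l : List Char) : (dropName l).length ≤ l.length := by
  induction l with
  | nil => simp [dropName]
  | cons c cs ih =>
    simp only [dropName]; split
    · exact le_rfl
    · exact Nat.le_succ_of_le ih

-- A's outer while loop (the `[]` branches are A's two RuntimeErrors, excluded by Pre_)
def goA : List Char → List (String × String)
  | [] => []
  | d :: rest =>
    if isDelim d then
      let name := takeName rest
      if name = [] then []        -- raise RuntimeError: empty segment name
      else (String.ofList [d], String.ofList name) :: goA (dropName rest)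
    else []                       -- raise RuntimeError: parse error at pos i
termination_by cs => cs.length
decreasing_by
  have := dropName_length_le rest; simp; omega

def parse_segments_field2 (s : String) : List (String × String) := goA s.toList

-- ===== PORT B =====
-- loop body of B; `none` models a raised RuntimeError (excluded by Pre_);
-- state = (out, name) exactly as in Source B, appends at the end as Python's list.append
def stepB (st : Option (List (String × String) × List Char)) (c : Char) :
    Option (List (String × String) × List Char) :=
  match st with
  | none => none
  | some (out, name) =>
    if isDelim c then
      if name = [] then none      -- raise RuntimeError: empty segment name
      else some (out ++ [(String.ofList [c], String.ofList name.reverse)], [])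
    else some (out, name ++ [c])

def parse_segments_field2_alt (s : String) : List (String × String) :=
  match s.toList.reverse.foldl stepB (some ([], [])) with
  | none => []                    -- a RuntimeError was raised (excluded by Pre_)
  | some (out, name) =>
    if name = [] then out.reverse -- out[::-1]
    else []                       -- raise RuntimeError: parse error at pos 0

-- ===== PRECONDITION & SPEC =====
-- Pre_ holds exactly on the well-formed field2 strings: A raises RuntimeError on all others
-- (leading non-delimiter, or a delimiter not followed by a name character).
def Pre_parse_segments_field2 (s : String) : Prop :=
  s.toList.head?.all isDelim = true ∧
  ((s.toList.zip s.toList.tail).all fun p => !(isDelim p.1 && isDelim p.2)) = true ∧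
  s.toList.getLast?.all (fun c => !isDelim c) = true
instance (s : String) : Decidable (Pre_parse_segments_field2 s) := by
  unfold Pre_parse_segments_field2; infer_instance

def pvWitness_parse_segments_field2 : String := "<A>B"

def Spec_parse_segments_field2 (s : String) (out : List (String × String)) : Prop :=
  out = parse_segments_field2_alt s
instance (s : String) (out : List (String × String)) : Decidable (Spec_parse_segments_field2 s out) := by
  unfold Spec_parse_segments_field2; infer_instance

-- ===== CLAIM (what is proved, stated in full; the proofs are below) =====
def Claim_equal_parse_segments_field2 : Prop :=
  ∀ (s : String), Dom_parse_segments_field2 s → Pre_parse_segments_field2 s →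
    Spec_parse_segments_field2 s (parse_segments_field2 s)

-- ===== LEMMAS AND PROOFS =====

-- the second conjunct of Pre_, on char lists
def PreIdx (cs : List Char) : Prop :=
  ∀ i < cs.length, isDelim (cs.getD i ' ') = true →
    i + 1 < cs.length ∧ isDelim (cs.getD (i + 1) ' ') = false

-- structural well-formedness, following goA's recursion
def WF : List Char → Prop
  | [] => True
  | d :: rest => isDelim d = true ∧ takeName rest ≠ [] ∧ WF (dropName rest)
termination_by cs => cs.length
decreasing_by
  have := dropName_length_le rest; simp; omega

theorem takeName_append_dropName (l : List Char) : takeName l ++ dropName l = l := by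
  induction l with
  | nil => rfl
  | cons c cs ih => simp only [takeName, dropName]; split <;> simp [ih]

theorem takeName_nondelim (l : List Char) : ∀ c ∈ takeName l, isDelim c = false := by
  induction l with
  | nil => simp [takeName]
  | cons c cs ih =>
    simp only [takeName]; split
    next => simp
    next hc =>
      intro x hx
      rcases List.mem_cons.mp hx with h | h
      · subst h; simpa using hc
      · exact ih x h

theorem dropName_head (l : List Char) : ∀ c t, dropName l = c :: t → isDelim c = true := by
  induction l with
  | nil => simp [dropName]
  | cons a cs ih =>
    intro c t h
    simp only [dropName] at h
    split at h
    · cases h; assumption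
    · exact ih c t h

theorem preIdx_of (cs : List Char)
    (hp : ((cs.zip cs.tail).all fun p => !(isDelim p.1 && isDelim p.2)) = true)
    (hl : cs.getLast?.all (fun c => !isDelim c) = true) : PreIdx cs := by
  intro i hi hd
  rw [List.getD_eq_getElem _ _ hi] at hd
  have hi1 : i + 1 < cs.length := by
    by_contra hcon
    have hieq : i = cs.length - 1 := by omega
    have hlast : cs.getLast? = some cs[i] := by
      rw [List.getLast?_eq_getElem?, List.getElem?_eq_getElem (by omega)]
      simp [hieq]
    rw [hlast] at hl
    simp [hd] at hl
  refine ⟨hi1, ?_⟩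
  have hz : i < (cs.zip cs.tail).length := by
    simp only [List.length_zip, List.length_tail]
    omega
  have hall := (List.all_eq_true.mp hp) _ (List.getElem_mem hz)
  rw [List.getElem_zip] at hall
  have ht : cs.tail[i]'(by simp only [List.length_tail]; omega) = cs[i + 1] :=
    List.getElem_tail ..
  rw [List.getD_eq_getElem _ _ hi1]
  rw [ht] at hall
  simpa [hd] using hall

theorem preIdx_tail {a : Char} {cs : List Char} (h : PreIdx (a :: cs)) : PreIdx cs := by
  intro i hi hd
  have := h (i + 1) (by simpa using Nat.succ_lt_succ hi) (by simpa using hd)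
  rcases this with ⟨h1, h2⟩
  exact ⟨by simpa using h1, by simpa using h2⟩

theorem preIdx_drop (cs : List Char) (k : ℕ) (h : PreIdx cs) : PreIdx (cs.drop k) := by
  induction k generalizing cs with
  | zero => simpa using h
  | succ k ih =>
    cases cs with
    | nil => intro i hi; simp at hi
    | cons a cs => simpa using ih cs (preIdx_tail h)

theorem dropName_eq_drop (l : List Char) : dropName l = l.drop (takeName l).length := by
  have h := congrArg (List.drop (takeName l).length) (takeName_append_dropName l)
  rw [List.drop_left] at h
  exact h

theorem wf_of_preIdx : ∀ (n : ℕ) (cs : List Char), cs.length ≤ n → PreIdx cs →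
    (∀ c t, cs = c :: t → isDelim c = true) → WF cs := by
  intro n
  induction n with
  | zero =>
    intro cs hlen _ _
    have : cs = [] := List.eq_nil_of_length_eq_zero (Nat.le_zero.mp hlen)
    subst this; simp [WF]
  | succ n ih =>
    intro cs hlen hpre hhead
    cases cs with
    | nil => simp [WF]
    | cons d rest =>
      have hd : isDelim d = true := hhead d rest rfl
      have h0 := hpre 0 (by simp) (by simpa using hd)
      rcases h0 with ⟨h1, h2⟩
      -- rest is nonempty and its head is not a delimiter
      obtain ⟨c0, t0, hrest⟩ : ∃ c0 t0, rest = c0 :: t0 := by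
        cases rest with
        | nil => simp at h1
        | cons x xs => exact ⟨x, xs, rfl⟩
      have hc0 : isDelim c0 = false := by
        subst hrest; simpa using h2
      have htn : takeName rest ≠ [] := by
        subst hrest; simp [takeName, hc0]
      rw [WF]
      refine ⟨hd, htn, ?_⟩
      have hdrop : dropName rest = (d :: rest).drop ((takeName rest).length + 1) := by
        simp [dropName_eq_drop]
      apply ih (dropName rest)
      · have := dropName_length_le rest
        simp at hlen; omega
      · rw [hdrop]; exact preIdx_drop _ _ hpre
      · intro c t hct; exact dropName_head rest c t hct

-- B's fold, folded from the right over the original list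
theorem foldl_reverse_stepB (cs : List Char) (st : Option (List (String × String) × List Char)) :
    cs.reverse.foldl stepB st = cs.foldr (fun c acc => stepB acc c) st := by
  rw [List.foldl_reverse]

-- folding a block of non-delimiter chars only extends the name accumulator
theorem foldr_nondelim (ns : List Char) (out : List (String × String)) (m : List Char)
    (h : ∀ c ∈ ns, isDelim c = false) :
    ns.foldr (fun c acc => stepB acc c) (some (out, m)) = some (out, m ++ ns.reverse) := by
  induction ns with
  | nil => simp
  | cons c ns ih =>
    have hc : isDelim c = false := h c (List.mem_cons_self ..)
    have ihm := ih (fun x hx => h x (List.mem_cons_of_mem _ hx))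
    simp only [List.foldr_cons]
    rw [ihm]
    simp [stepB, hc]

-- main invariant: on well-formed input B's fold computes goA's result reversed
theorem foldr_eq_goA : ∀ (n : ℕ) (cs : List Char), cs.length ≤ n → WF cs →
    cs.foldr (fun c acc => stepB acc c) (some ([], [])) = some ((goA cs).reverse, []) := by
  intro n
  induction n with
  | zero =>
    intro cs hlen _
    have : cs = [] := List.eq_nil_of_length_eq_zero (Nat.le_zero.mp hlen)
    subst this; simp [goA]
  | succ n ih =>
    intro cs hlen hwf
    cases cs with
    | nil => simp [goA]
    | cons d rest =>
      rw [WF] at hwf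
      obtain ⟨hd, hname, hwf'⟩ := hwf
      have ihr := ih (dropName rest) (by have := dropName_length_le rest; simp at hlen; omega) hwf'
      have hsplit := takeName_append_dropName rest
      have hnd := takeName_nondelim rest
      calc (d :: rest).foldr (fun c acc => stepB acc c) (some ([], []))
          = stepB (rest.foldr (fun c acc => stepB acc c) (some ([], []))) d := by simp
        _ = stepB ((takeName rest ++ dropName rest).foldr (fun c acc => stepB acc c)
              (some ([], []))) d := by rw [hsplit]
        _ = stepB (some ((goA (dropName rest)).reverse, (takeName rest).reverse)) d := by
              rw [List.foldr_append, ihr, foldr_nondelim _ _ _ hnd]; simp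
        _ = some ((goA (d :: rest)).reverse, []) := by
              simp [stepB, goA, hd, hname]

-- ===== VERDICT (by name: the statement is the Claim_ definition above) =====
theorem parse_segments_field2_spec : Claim_equal_parse_segments_field2 := by
  intro s _ hpre
  unfold Spec_parse_segments_field2 parse_segments_field2 parse_segments_field2_alt
  rcases hpre with ⟨hhead, hp, hl⟩
  have hidx := preIdx_of s.toList hp hl
  have hwf : WF s.toList := by
    apply wf_of_preIdx s.toList.length s.toList le_rfl hidx
    intro c t hct
    rw [hct] at hhead; simpa using hhead
  rw [foldl_reverse_stepB, foldr_eq_goA s.toList.length _ le_rfl hwf]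
  simp
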